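-- pv_equiv track=rewrite | github.com/shotz19/Code | recursionpractice.py | ce
-- ===== SOURCE A (Python) =====
-- def ce(n):
-- 	if n is 0:
-- 		return 0
-- 	if n%10 ==8:
-- 		if n%100==88:
-- 			return 2+ce(n//10)
-- 		else:
-- 			return 1+ce(n//10)
-- 	return ce(n //10)
-- ===== SOURCE B (Python) =====
-- def ce(n):
--     s = str(n)
--     eights = sum(1 for c in s if c == '8')
--     pairs = sum(1 for a, b in zip(s, s[1:]) if a == '8' and b == '8')
--     return eights + pairs
-- ===== Notes on version B (the rewrite author's own statement) =====
-- stated objective: simpler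
-- what changed: Replaces A's LSB-first arithmetic recursion (n%10/n%100/n//10) with a single MSB-first scan of str(n): count '8' characters plus overlapping adjacent '8','8' pairs via zip(s, s[1:]).
import Mathlib
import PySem

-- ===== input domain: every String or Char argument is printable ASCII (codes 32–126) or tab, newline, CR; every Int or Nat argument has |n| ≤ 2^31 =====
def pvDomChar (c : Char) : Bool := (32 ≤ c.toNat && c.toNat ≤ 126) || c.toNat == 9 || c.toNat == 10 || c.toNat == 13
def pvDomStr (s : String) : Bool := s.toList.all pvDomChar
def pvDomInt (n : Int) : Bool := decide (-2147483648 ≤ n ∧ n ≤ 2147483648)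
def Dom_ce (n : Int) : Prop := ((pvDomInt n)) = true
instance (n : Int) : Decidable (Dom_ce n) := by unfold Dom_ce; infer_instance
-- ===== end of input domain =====

-- B replaces A's LSB-first arithmetic recursion with one MSB-first scan of str(n)
-- (count '8' chars + overlapping adjacent '8''8' pairs); objective: simpler.

-- ===== PORT A =====
-- A's recursion: base case zero, then branch on the last one/two digits and recurse on the quotient by ten.
-- On 0 ≤ n (all of Pre_ce) Python's % and // coincide with Nat's % and /, so the
-- recursion is carried on n.toNat; on n < 0 Python A never terminates (RecursionError,
-- excluded by Pre_ce), so no value is claimed there.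
def ceGo (m : Nat) : Int :=
  if m = 0 then 0
  else if m % 10 = 8 then
    if m % 100 = 88 then 2 + ceGo (m / 10)
    else 1 + ceGo (m / 10)
  else ceGo (m / 10)
decreasing_by all_goals exact Nat.div_lt_self (Nat.pos_of_ne_zero (by assumption)) (by omega)

def ce (n : Int) : Int := ceGo n.toNat

-- ===== PORT B =====
-- s = str(n) → PySem.Int.toChars n; s[1:] on a list is its tail; the two
-- generator sums are countP over the characters and over zip(s, s[1:]).
def ce_alt (n : Int) : Int :=
  let cs := PySem.Int.toChars n
  let eights : Int := (cs.countP (fun c => c == '8') : Nat)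
  let pairs : Int := ((cs.zip cs.tail).countP (fun p => p.1 == '8' && p.2 == '8') : Nat)
  eights + pairs

-- ===== PRECONDITION & SPEC =====
-- Pre_ce: A terminates exactly on non-negative n (for negative n Python's floor quotient
-- by ten stabilises at minus one, so Python A recurses forever and raises RecursionError).
def Pre_ce (n : Int) : Prop := 0 ≤ n
instance (n : Int) : Decidable (Pre_ce n) := by unfold Pre_ce; infer_instance
def pvWitness_ce : Int := 888

def Spec_ce (n : Int) (out : Int) : Prop := out = ce_alt n
instance (n : Int) (out : Int) : Decidable (Spec_ce n out) := by unfold Spec_ce; infer_instance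

-- ===== CLAIM (what is proved, stated in full; the proofs are below) =====
def Claim_equal_ce : Prop := ∀ (n : Int), Dom_ce n → Pre_ce n → Spec_ce n (ce n)

-- ===== LEMMAS AND PROOFS =====

-- the digit-character list of m, MSB first, by the natural recursion
def digitsRec (m : Nat) : List Char :=
  if m < 10 then [Nat.digitChar m]
  else digitsRec (m / 10) ++ [Nat.digitChar (m % 10)]
decreasing_by exact Nat.div_lt_self (by omega) (by omega)

def count8 (cs : List Char) : Nat := cs.countP (fun c => c == '8')
def pairs88 (cs : List Char) : Nat :=
  (cs.zip cs.tail).countP (fun p => p.1 == '8' && p.2 == '8')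

lemma toDigitsCore_eq (f : Nat) : ∀ (n : Nat), n < f → ∀ (l : List Char),
    Nat.toDigitsCore 10 f n l = digitsRec n ++ l := by
  induction f with
  | zero => intro n h; omega
  | succ f ih =>
    intro n h l
    rw [Nat.toDigitsCore]
    by_cases h10 : n < 10
    · rw [if_pos (show n / 10 = 0 by omega)]
      conv_rhs => rw [digitsRec]
      rw [if_pos h10, Nat.mod_eq_of_lt h10]
      simp
    · rw [if_neg (show ¬ n / 10 = 0 by omega), ih (n / 10) (by omega)]
      conv_rhs => rw [digitsRec]
      rw [if_neg h10]
      simp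

lemma toDigits_eq (n : Nat) : Nat.toDigits 10 n = digitsRec n := by
  rw [Nat.toDigits, toDigitsCore_eq (n + 1) n (by omega) [], List.append_nil]

lemma count8_append (xs : List Char) (d : Char) :
    count8 (xs ++ [d]) = count8 xs + (if d = '8' then 1 else 0) := by
  by_cases h : d = '8' <;> simp [count8, List.countP_append, h]

lemma pairs88_cons_cons (a b : Char) (t : List Char) :
    pairs88 (a :: b :: t) = (if a = '8' ∧ b = '8' then 1 else 0) + pairs88 (b :: t) := by
  simp only [pairs88, List.zip, List.tail, List.zipWith, List.countP_cons]
  by_cases ha : a = '8' <;> by_cases hb : b = '8' <;>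
    simp [ha, hb, Nat.add_comm]

lemma pairs88_append_pair (xs : List Char) (a d : Char) :
    pairs88 (xs ++ [a, d]) = pairs88 (xs ++ [a]) + (if a = '8' ∧ d = '8' then 1 else 0) := by
  induction xs with
  | nil =>
    simp only [List.nil_append]
    rw [pairs88_cons_cons]
    simp [pairs88]
  | cons x t ih =>
    cases t with
    | nil =>
      simp only [List.cons_append, List.nil_append]
      rw [pairs88_cons_cons, pairs88_cons_cons, pairs88_cons_cons]
      simp [pairs88]
    | cons y u =>
      simp only [List.cons_append] at ih ⊢
      rw [pairs88_cons_cons, pairs88_cons_cons, ih]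
      omega

lemma digitsRec_last (m : Nat) :
    ∃ xs, digitsRec m = xs ++ [Nat.digitChar (m % 10)] := by
  rw [digitsRec]
  by_cases h : m < 10
  · exact ⟨[], by simp [h, Nat.mod_eq_of_lt h]⟩
  · exact ⟨digitsRec (m / 10), by simp [h]⟩

lemma digitChar_eq_eight {k : Nat} (h : k < 10) : (Nat.digitChar k = '8') ↔ k = 8 := by
  interval_cases k <;> simp [Nat.digitChar]

lemma ceGo_zero : ceGo 0 = 0 := by rw [ceGo]; simp

lemma ceGo_eq (m : Nat) :
    ceGo m = (count8 (digitsRec m) : Int) + (pairs88 (digitsRec m) : Int) := by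
  induction m using Nat.strong_induction_on with
  | _ m ih =>
    by_cases h10 : m < 10
    · rw [digitsRec, if_pos h10, ceGo]
      by_cases h0 : m = 0
      · simp [h0, count8, pairs88, Nat.digitChar]
      · rw [if_neg h0]
        have hm : m % 10 = m := Nat.mod_eq_of_lt h10
        have hq : m / 10 = 0 := by omega
        have h100 : m % 100 = m := Nat.mod_eq_of_lt (by omega)
        by_cases h8 : m = 8
        · rw [hm, if_pos h8, if_neg (by omega), hq, ceGo_zero, h8]
          simp [count8, pairs88, Nat.digitChar]
        · rw [hm, if_neg h8]
          have hd : ¬ (Nat.digitChar m = '8') := by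
            rw [digitChar_eq_eight h10]; exact h8
          rw [hq, ceGo_zero]
          simp [count8, pairs88, hd]
    · -- m ≥ 10: peel the last digit
      have hrec : digitsRec m = digitsRec (m / 10) ++ [Nat.digitChar (m % 10)] := by
        rw [digitsRec]; simp [h10]
      obtain ⟨xs, hxs⟩ := digitsRec_last (m / 10)
      have hc : count8 (digitsRec m)
          = count8 (digitsRec (m / 10)) + (if Nat.digitChar (m % 10) = '8' then 1 else 0) := by
        rw [hrec, count8_append]
      have hp : pairs88 (digitsRec m)
          = pairs88 (digitsRec (m / 10))
            + (if Nat.digitChar (m / 10 % 10) = '8' ∧ Nat.digitChar (m % 10) = '8' then 1 else 0) := by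
        rw [hrec, hxs, List.append_assoc]
        simpa [← hxs] using
          pairs88_append_pair xs (Nat.digitChar (m / 10 % 10)) (Nat.digitChar (m % 10))
      have ihm := ih (m / 10) (Nat.div_lt_self (by omega) (by omega))
      have hd1 : (Nat.digitChar (m % 10) = '8') ↔ m % 10 = 8 :=
        digitChar_eq_eight (Nat.mod_lt _ (by omega))
      have hd2 : (Nat.digitChar (m / 10 % 10) = '8') ↔ m / 10 % 10 = 8 :=
        digitChar_eq_eight (Nat.mod_lt _ (by omega))
      have h88 : m % 100 = 88 ↔ (m % 10 = 8 ∧ m / 10 % 10 = 8) := by omega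
      rw [ceGo, if_neg (by omega : ¬ m = 0), ihm, hc, hp]
      simp only [hd1, hd2, h88]
      split_ifs <;> push_cast <;> omega

-- ===== VERDICT (by name: the statement is the Claim_ definition above) =====
theorem ce_spec : Claim_equal_ce := by
  intro n _ hpre
  have hpre' : (0 : Int) ≤ n := hpre
  unfold Spec_ce ce ce_alt
  have hneg : ¬ n < 0 := by omega
  have htoC : PySem.Int.toChars n = digitsRec n.toNat := by
    simp [PySem.Int.toChars, hneg, toDigits_eq]
  rw [htoC, ceGo_eq n.toNat]
  simp [count8, pairs88]
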